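-- pv_equiv track=rewrite | github.com/goeastagent/MedicalAIMaster | ExtractionAgent/src/agents/nodes/parameter_resolver/prompts.py | _format_parameter_examples
-- ===== SOURCE A (Python) =====
-- def _format_parameter_examples(parameter_examples: list) -> str:
--     """
--     Format parameter examples by source for the prompt.
--
--     Args:
--         parameter_examples: List from SchemaContextBuilder.get_parameter_examples()
--
--     Returns:
--         Formatted string showing examples by source
--     """
--     if not parameter_examples:
--         return "No parameter examples available."
--
--     # Group by source
--     by_source = {}
--     for ex in parameter_examples:
--         source = ex.get("source", "unknown")
--         if source not in by_source:
--             by_source[source] = []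
--         by_source[source].append(ex)
--
--     lines = []
--     for source, examples in sorted(by_source.items()):
--         source_type = examples[0].get("source_type", "unknown")
--         lines.append(f"[{source}] ({source_type})")
--
--         for ex in examples:
--             unit_str = f" ({ex.get('unit')})" if ex.get('unit') else ""
--             cat_str = f" - {ex.get('category')}" if ex.get('category') else ""
--             lines.append(f"  - {ex.get('param_key')}: {ex.get('semantic_name')}{unit_str}{cat_str}")
--
--         lines.append("")  # Empty line between sources
--
--     return "\n".join(lines)
-- ===== SOURCE B (Python) =====
-- def _format_parameter_examples(parameter_examples: list) -> str:
--     if not parameter_examples: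
--         return "No parameter examples available."
--
--     def src(ex):
--         return ex.get("source", "unknown")
--
--     def example_line(ex):
--         unit_str = f" ({ex.get('unit')})" if ex.get('unit') else ""
--         cat_str = f" - {ex.get('category')}" if ex.get('category') else ""
--         return f"  - {ex.get('param_key')}: {ex.get('semantic_name')}{unit_str}{cat_str}"
--
--     def group_lines(source):
--         group = [ex for ex in parameter_examples if src(ex) == source]
--         header = f"[{source}] ({group[0].get('source_type', 'unknown')})"
--         return [header] + [example_line(ex) for ex in group] + [""]
--
--     return "\n".join(
--         line
--         for source in sorted({src(ex) for ex in parameter_examples})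
--         for line in group_lines(source)
--     )
-- ===== Notes on version B (the rewrite author's own statement) =====
-- stated objective: simpler
-- what changed: Replaces A's one-pass dict grouping followed by sorting the dict items with a sort of the distinct source keys (sorted set of sources) and a per-source filter comprehension of the input list, emitting each group's lines via a flat generator expression instead of nested append loops.
import Mathlib
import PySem

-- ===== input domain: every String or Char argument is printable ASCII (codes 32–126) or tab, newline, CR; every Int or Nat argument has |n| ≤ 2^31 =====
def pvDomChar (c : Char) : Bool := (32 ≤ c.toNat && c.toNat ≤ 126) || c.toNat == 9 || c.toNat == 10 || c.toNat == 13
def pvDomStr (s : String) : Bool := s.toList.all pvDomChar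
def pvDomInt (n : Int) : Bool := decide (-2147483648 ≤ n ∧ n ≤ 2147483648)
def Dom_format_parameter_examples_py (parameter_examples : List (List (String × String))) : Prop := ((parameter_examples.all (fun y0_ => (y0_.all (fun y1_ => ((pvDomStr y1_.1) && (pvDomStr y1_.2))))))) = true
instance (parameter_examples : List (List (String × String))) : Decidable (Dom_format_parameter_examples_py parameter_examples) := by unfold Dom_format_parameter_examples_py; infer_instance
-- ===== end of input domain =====

-- B replaces A's one-pass dict grouping + items sort by sorting the distinct source keys and
-- filtering the input list per source (objective: simpler; not faster).

-- ===== PORT A =====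
-- ex.get(k); by the type convention lookup on the assoc list is first match (PySem.Dict.get?)
def aGet (ex : List (String × String)) (k : String) : Option String := (PySem.Dict.mk ex).get? k
def aGetD (ex : List (String × String)) (k dflt : String) : String := (PySem.Dict.mk ex).getD k dflt
-- f-string rendering of ex.get(k): "None" when the key is absent
def aRep : Option String → String
  | none => "None"
  | some s => s
-- Python truthiness of ex.get(k): present and a non-empty string
def aTruthy : Option String → Bool
  | none => false
  | some s => !(s == "")
-- the f"  - {…}: {…}{unit_str}{cat_str}" line of A's inner loop
def aExampleLine (ex : List (String × String)) : String :=
  let unit_str := if aTruthy (aGet ex "unit") then " (" ++ aRep (aGet ex "unit") ++ ")" else ""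
  let cat_str := if aTruthy (aGet ex "category") then " - " ++ aRep (aGet ex "category") else ""
  "  - " ++ aRep (aGet ex "param_key") ++ ": " ++ aRep (aGet ex "semantic_name") ++ unit_str ++ cat_str
-- f"[{source}] ({source_type})"; examples[0]: every group built by the loop is nonempty, so headD [] is never taken
def aHeader (p : String × List (List (String × String))) : String :=
  "[" ++ p.1 ++ "] (" ++ aGetD (p.2.headD []) "source_type" "unknown" ++ ")"

def format_parameter_examples_py (parameter_examples : List (List (String × String))) : String :=
  if parameter_examples = [] then "No parameter examples available."
  else
    -- 'if source not in by_source: by_source[source] = []; by_source[source].append(ex)' = modify source [] (· ++ [ex])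
    let by_source : PySem.Dict String (List (List (String × String))) :=
      parameter_examples.foldl
        (fun d ex => d.modify (aGetD ex "source" "unknown") [] (· ++ [ex])) PySem.Dict.empty
    -- sorted(by_source.items()): dict keys are distinct, so Python's tuple sort never compares the
    -- (uncomparable) value lists; sorting by the first component is exact
    let lines := (PySem.List.sorted by_source.items (fun p => p.1) false).foldl
      (fun lines p =>
        (p.2.foldl (fun ls ex => ls ++ [aExampleLine ex]) (lines ++ [aHeader p])) ++ [""]) []
    PySem.Str.join "\n" lines

-- ===== PORT B =====
def bGet (ex : List (String × String)) (k : String) : Option String := (PySem.Dict.mk ex).get? k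
def bRep : Option String → String
  | none => "None"
  | some s => s
def bTruthy : Option String → Bool
  | none => false
  | some s => !(s == "")
-- src(ex) = ex.get("source", "unknown")
def bSrc (ex : List (String × String)) : String := (PySem.Dict.mk ex).getD "source" "unknown"
def bExampleLine (ex : List (String × String)) : String :=
  let unit_str := if bTruthy (bGet ex "unit") then " (" ++ bRep (bGet ex "unit") ++ ")" else ""
  let cat_str := if bTruthy (bGet ex "category") then " - " ++ bRep (bGet ex "category") else ""
  "  - " ++ bRep (bGet ex "param_key") ++ ": " ++ bRep (bGet ex "semantic_name") ++ unit_str ++ cat_str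
-- group_lines(source); group[0]: the group is nonempty since source comes from the set of sources, so headD [] is never taken
def bGroupLines (parameter_examples : List (List (String × String))) (source : String) : List String :=
  let group := parameter_examples.filter (fun ex => bSrc ex == source)
  ("[" ++ source ++ "] (" ++ (PySem.Dict.mk (group.headD [])).getD "source_type" "unknown" ++ ")")
    :: (group.map bExampleLine ++ [""])

def format_parameter_examples_py_alt (parameter_examples : List (List (String × String))) : String :=
  if parameter_examples = [] then "No parameter examples available."
  else
    PySem.Str.join "\n"
      ((PySem.List.sorted (PySem.Set.ofList (parameter_examples.map bSrc)) (fun s => s) false).flatMap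
        (bGroupLines parameter_examples))

-- ===== PRECONDITION & SPEC =====
def Spec_format_parameter_examples_py (parameter_examples : List (List (String × String))) (out : String) : Prop := out = format_parameter_examples_py_alt parameter_examples
instance (parameter_examples : List (List (String × String))) (out : String) : Decidable (Spec_format_parameter_examples_py parameter_examples out) := by unfold Spec_format_parameter_examples_py; infer_instance

-- ===== CLAIM (what is proved, stated in full; the proofs are below) =====
def Claim_equal_format_parameter_examples_py : Prop := ∀ (parameter_examples : List (List (String × String))), Dom_format_parameter_examples_py parameter_examples → Spec_format_parameter_examples_py parameter_examples (format_parameter_examples_py parameter_examples)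

-- ===== LEMMAS AND PROOFS =====

-- A's grouping fold, named for the proofs
def aBySource (l : List (List (String × String))) : PySem.Dict String (List (List (String × String))) :=
  l.foldl (fun d ex => d.modify (aGetD ex "source" "unknown") [] (· ++ [ex])) PySem.Dict.empty

lemma aGetD_source_eq_bSrc (ex : List (String × String)) :
    aGetD ex "source" "unknown" = bSrc ex := rfl

lemma aBySource_getD (l : List (List (String × String))) (s : String) :
    (aBySource l).getD s [] = l.filter (fun ex => bSrc ex == s) := by
  have h := PySem.Dict.getD_foldl_modify_append (l.map (fun ex => (bSrc ex, ex)))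
      PySem.Dict.empty s
  rw [List.foldl_map] at h
  simpa [aBySource, aGetD_source_eq_bSrc, List.filter_map, List.map_map, Function.comp_def] using h

lemma aBySource_keys (l : List (List (String × String))) :
    (aBySource l).keys = PySem.Set.ofList (l.map bSrc) := by
  have h := PySem.Dict.keys_foldl_modify_key l bSrc [] (fun _ ex v => v ++ [ex]) PySem.Dict.empty
  simpa [aBySource, aGetD_source_eq_bSrc, PySem.Dict.keys_empty, PySem.Set.update_nil_left] using h

lemma aBySource_keys_nodup (l : List (List (String × String))) :
    (aBySource l).keys.Nodup := by
  have h := PySem.Dict.nodup_keys_foldl_modify_key l bSrc [] (fun _ ex v => v ++ [ex])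
      PySem.Dict.empty (by simp [PySem.Dict.keys_empty])
  simpa [aBySource, aGetD_source_eq_bSrc] using h

-- the sorted items of A's dict are exactly B's sorted distinct sources, paired with their filtered groups
lemma sorted_items_eq (l : List (List (String × String))) :
    PySem.List.sorted (aBySource l).items (fun p => p.1) false
      = (PySem.List.sorted (PySem.Set.ofList (l.map bSrc)) (fun s => s) false).map
          (fun k => (k, l.filter (fun ex => bSrc ex == k))) := by
  apply PySem.List.sorted_eq_of_perm_of_pairwise_lt
  · have h1 : ((PySem.List.sorted (PySem.Set.ofList (l.map bSrc)) (fun s => s) false).map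
          (fun k => (k, l.filter (fun ex => bSrc ex == k)))).Perm
        ((PySem.Set.ofList (l.map bSrc)).map (fun k => (k, l.filter (fun ex => bSrc ex == k)))) :=
      (PySem.List.sorted_perm _ _ _).map _
    have h2 : ((PySem.Set.ofList (l.map bSrc)).map
          (fun k => (k, l.filter (fun ex => bSrc ex == k)))) = (aBySource l).items := by
      rw [PySem.Dict.items_eq_map_keys (aBySource l) (aBySource_keys_nodup l) [], aBySource_keys]
      exact (List.map_congr_left (fun k _ => by rw [aBySource_getD])).symm
    exact h2 ▸ h1
  · simp only [List.pairwise_map]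
    simpa using PySem.List.sorted_ofList_pairwise_lt (l.map bSrc)

lemma flatMap_singleton_map {α β : Type} (f : α → β) (l : List α) :
    l.flatMap (fun x => [f x]) = l.map f := by
  induction l with
  | nil => rfl
  | cons a t ih => simp [ih]

-- A's nested append loops, flattened
lemma foldl_lines (ps : List (String × List (List (String × String)))) (acc : List String) :
    ps.foldl (fun lines p =>
        (p.2.foldl (fun ls ex => ls ++ [aExampleLine ex]) (lines ++ [aHeader p])) ++ [""]) acc
      = acc ++ ps.flatMap (fun p => aHeader p :: (p.2.map aExampleLine ++ [""])) := by
  induction ps generalizing acc with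
  | nil => simp
  | cons p ps ih =>
      rw [List.foldl_cons, ih, PySem.List.foldl_append_eq_flatMap]
      simp [List.flatMap_cons, flatMap_singleton_map]

-- ===== VERDICT (by name: the statement is the Claim_ definition above) =====
theorem format_parameter_examples_py_spec : Claim_equal_format_parameter_examples_py := by
  intro l _
  unfold Spec_format_parameter_examples_py
  unfold format_parameter_examples_py format_parameter_examples_py_alt
  by_cases h : l = []
  · simp [h]
  · simp only [if_neg h]
    congr 1
    rw [show (l.foldl (fun d ex => d.modify (aGetD ex "source" "unknown") [] (· ++ [ex]))
          PySem.Dict.empty) = aBySource l from rfl]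
    rw [sorted_items_eq, foldl_lines, List.nil_append, List.flatMap_map]
    rfl
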